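-- pv_equiv track=rewrite | github.com/dhu2022-dev/codeforces | 2025-12-23_Round1071_Div3/BlackslexAndShowering.py | solve
-- ===== SOURCE A (Python) =====
-- def solve(n, arr):
--     if n == 1:
--         return 0
--
--     total = sum(abs(arr[i] - arr[i+1]) for i in range(n-1))
--
--     max_save = 0
--
--     # endpoints
--     max_save = max(max_save, abs(arr[0] - arr[1]))
--     max_save = max(max_save, abs(arr[n-1] - arr[n-2]))
--
--     # interior spikes
--     for i in range(1, n-1):
--         save = abs(arr[i] - arr[i-1]) + abs(arr[i] - arr[i+1]) - abs(arr[i+1] - arr[i-1])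
--         max_save = max(max_save, save)
--
--     return total - max_save
-- ===== SOURCE B (Python) =====
-- def solve(n, arr):
--     if n == 1:
--         return 0
--     costs = []
--     for i in range(n):
--         rem = [arr[j] for j in range(n) if j != i]
--         c = 0
--         for j in range(len(rem) - 1):
--             c += abs(rem[j] - rem[j + 1])
--         costs.append(c)
--     return min(costs)
-- ===== Notes on version B (the rewrite author's own statement) =====
-- stated objective: alternative
-- what changed: B brute-forces the answer: it tries every single removal, rebuilds the reduced sequence and rescans it for its adjacent-difference cost, taking the minimum, instead of A's one-pass total-minus-best-saving closed form.
-- outside the precondition, e.g. on solve(0, [1, 5]): A returns -4, B raises ValueError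
import Mathlib
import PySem

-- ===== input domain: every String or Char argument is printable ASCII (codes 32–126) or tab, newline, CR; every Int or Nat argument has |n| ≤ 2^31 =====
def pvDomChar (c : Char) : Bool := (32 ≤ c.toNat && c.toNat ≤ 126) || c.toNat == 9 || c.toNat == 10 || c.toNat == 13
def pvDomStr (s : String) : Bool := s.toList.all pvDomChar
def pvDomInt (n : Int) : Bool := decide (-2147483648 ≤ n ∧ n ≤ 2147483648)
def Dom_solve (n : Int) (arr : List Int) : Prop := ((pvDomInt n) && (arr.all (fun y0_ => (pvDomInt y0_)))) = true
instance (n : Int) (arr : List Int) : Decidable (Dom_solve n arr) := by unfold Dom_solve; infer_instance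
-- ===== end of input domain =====

-- B re-implements the answer by brute force over all single removals (rescanning each reduced
-- sequence), instead of A's one-pass total-minus-best-saving formula; equivalence of the RETURN
-- values is proved on Pre_solve below.

-- ===== PORT A =====
def solve (n : Int) (arr : List Int) : Int :=
  if n = 1 then 0
  else
    let total := ((PySem.List.pyRange 0 (n - 1) 1).map
      (fun i => |PySem.List.pyGetD arr i 0 - PySem.List.pyGetD arr (i + 1) 0|)).sum
    let maxSave0 : Int := 0
    let maxSave1 := max maxSave0 |PySem.List.pyGetD arr 0 0 - PySem.List.pyGetD arr 1 0|
    let maxSave2 := max maxSave1 |PySem.List.pyGetD arr (n - 1) 0 - PySem.List.pyGetD arr (n - 2) 0|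
    let maxSave := (PySem.List.pyRange 1 (n - 1) 1).foldl
      (fun m i => max m (|PySem.List.pyGetD arr i 0 - PySem.List.pyGetD arr (i - 1) 0| +
                         |PySem.List.pyGetD arr i 0 - PySem.List.pyGetD arr (i + 1) 0| -
                         |PySem.List.pyGetD arr (i + 1) 0 - PySem.List.pyGetD arr (i - 1) 0|)) maxSave2
    total - maxSave

-- ===== PORT B =====
-- helper: the inner rescanning loop of B ('c += abs(rem[j] - rem[j+1])')
def bCost (rem : List Int) : Int :=
  (PySem.List.pyRange 0 (PySem.List.len rem - 1) 1).foldl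
    (fun c j => c + |PySem.List.pyGetD rem j 0 - PySem.List.pyGetD rem (j + 1) 0|) 0

def solve_alt (n : Int) (arr : List Int) : Int :=
  if n = 1 then 0
  else
    let costs := (PySem.List.pyRange 0 n 1).foldl
      (fun cs i => cs ++ [bCost (((PySem.List.pyRange 0 n 1).filter (fun j => j ≠ i)).map
        (fun j => PySem.List.pyGetD arr j 0))]) []
    (PySem.List.min? costs (fun x => x)).getD 0

-- ===== PRECONDITION & SPEC =====
-- Pre_ excludes n ≤ 0 and n > len(arr): with 2 ≤ n > len(arr) A raises IndexError; with n ≤ 0 A either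
-- raises IndexError or, through negative-index wraparound, returns a meaningless non-positive value,
-- while B's min() over zero removal candidates raises ValueError there.
def Pre_solve (n : Int) (arr : List Int) : Prop :=
  n = 1 ∨ (2 ≤ n ∧ n ≤ (arr.length : Int))
instance (n : Int) (arr : List Int) : Decidable (Pre_solve n arr) := by unfold Pre_solve; infer_instance

def pvWitness_solve : Int × List Int := (3, [1, 5, 2])

def Spec_solve (n : Int) (arr : List Int) (out : Int) : Prop := out = solve_alt n arr
instance (n : Int) (arr : List Int) (out : Int) : Decidable (Spec_solve n arr out) := by unfold Spec_solve; infer_instance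

-- ===== CLAIM (what is proved, stated in full; the proofs are below) =====
def Claim_equal_solve : Prop := ∀ (n : Int) (arr : List Int), Dom_solve n arr → Pre_solve n arr → Spec_solve n arr (solve n arr)

-- ===== LEMMAS AND PROOFS =====

-- value at index i, default 0 (proof-side shorthand)
def gv (l : List Int) (i : Nat) : Int := l.getD i 0

-- structural adjacent-difference cost of a sequence
def cost : List Int → Int
  | a :: b :: t => |a - b| + cost (b :: t)
  | _ => 0

-- the saving obtained by removing index i
def save (l : List Int) (i : Nat) : Int :=
  if i = 0 then |gv l 0 - gv l 1|
  else if i = l.length - 1 then |gv l i - gv l (i - 1)|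
  else |gv l i - gv l (i - 1)| + |gv l i - gv l (i + 1)| - |gv l (i + 1) - gv l (i - 1)|

theorem cost_indexed : ∀ l : List Int,
    ((List.range (l.length - 1)).map (fun j => |gv l j - gv l (j + 1)|)).sum = cost l := by
  intro l
  induction l with
  | nil => simp [cost]
  | cons a l2 ih =>
    match l2 with
    | [] => simp [cost]
    | b :: t =>
      have h : (a :: b :: t).length - 1 = (b :: t).length - 1 + 1 := by simp
      rw [h, List.range_succ_eq_map]
      simp only [List.map_cons, List.map_map, List.sum_cons]
      have : ((List.range ((b :: t).length - 1)).map
          ((fun j => |gv (a :: b :: t) j - gv (a :: b :: t) (j + 1)|) ∘ Nat.succ))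
          = (List.range ((b :: t).length - 1)).map (fun j => |gv (b :: t) j - gv (b :: t) (j + 1)|) := by
        apply List.map_congr_left
        intro k _
        simp [gv]
      rw [this, ih]
      simp [cost, gv]

theorem save_nonneg (l : List Int) (i : Nat) : 0 ≤ save l i := by
  unfold save
  split_ifs
  · exact abs_nonneg _
  · exact abs_nonneg _
  · have h1 : |gv l (i + 1) - gv l (i - 1)| ≤ |gv l (i + 1) - gv l i| + |gv l i - gv l (i - 1)| :=
      abs_sub_le _ _ _
    have h2 : |gv l (i + 1) - gv l i| = |gv l i - gv l (i + 1)| := abs_sub_comm _ _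
    linarith

theorem save_shift (a : Int) (l : List Int) (j : Nat) :
    save (a :: l) (j + 2) = save l (j + 1) := by
  unfold save
  have h1 : gv (a :: l) (j + 2) = gv l (j + 1) := by simp [gv]
  have h2 : gv (a :: l) (j + 2 - 1) = gv l (j + 1 - 1) := by simp [gv]
  have h3 : gv (a :: l) (j + 2 + 1) = gv l (j + 1 + 1) := by simp [gv]
  have h4 : (j + 2 = (a :: l).length - 1) ↔ (j + 1 = l.length - 1) := by
    cases l <;> simp
  rw [h1, h2, h3]
  by_cases hb : j + 1 = l.length - 1
  · rw [if_neg (by omega), if_pos (h4.mpr hb), if_neg (by omega), if_pos hb]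
  · rw [if_neg (by omega), if_neg (fun h => hb (h4.mp h)), if_neg (by omega), if_neg hb]

theorem cost_eraseIdx : ∀ (l : List Int) (i : Nat), 2 ≤ l.length → i < l.length →
    cost (l.eraseIdx i) = cost l - save l i := by
  intro l
  induction l with
  | nil => intro i h _; simp at h
  | cons a l2 ih =>
    intro i h2 hi
    match l2, i with
    | [], _ => simp at h2
    | b :: t, 0 =>
      simp [List.eraseIdx, cost, save, gv]
    | b :: t, 1 =>
      match t with
      | [] =>
        simp only [List.eraseIdx, cost, save, gv]
        norm_num
        linarith [abs_sub_comm a b]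
      | c :: t' =>
        norm_num [List.eraseIdx, cost, save, gv]
        rw [abs_sub_comm b a, abs_sub_comm c a]
        ring
    | b :: t, (k + 2) =>
      match t with
      | [] => simp at hi
      | c :: t' =>
        have he : (a :: b :: c :: t').eraseIdx (k + 2) = a :: (b :: c :: t').eraseIdx (k + 1) := by
          simp [List.eraseIdx]
        have he2 : (b :: c :: t').eraseIdx (k + 1) = b :: (c :: t').eraseIdx k := by
          simp [List.eraseIdx]
        rw [he, he2]
        have ihh := ih (k + 1) (by simp) (by simp at hi ⊢; omega)
        rw [he2] at ihh
        have hcost : cost (a :: b :: (c :: t').eraseIdx k) = |a - b| + cost (b :: (c :: t').eraseIdx k) := by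
          cases hck : (c :: t').eraseIdx k <;> simp [cost]
        rw [hcost, ihh, save_shift]
        simp [cost]
        ring

theorem foldl_max_init (g : Nat → Int) : ∀ (t : List Nat) (a b : Int),
    t.foldl (fun x k => max x (g k)) (max a b) = max (t.foldl (fun x k => max x (g k)) a) b := by
  intro t
  induction t with
  | nil => intro a b; rfl
  | cons h t ih =>
    intro a b
    simp only [List.foldl_cons]
    rw [show max (max a b) (g h) = max (max a (g h)) b by omega, ih]

theorem foldl_min_sub (f : Nat → Int) (C : Int) : ∀ (t : List Nat) (a : Int),
    t.foldl (fun x k => min x (C - f k)) (C - a) = C - t.foldl (fun x k => max x (f k)) a := by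
  intro t
  induction t with
  | nil => intro a; rfl
  | cons h t ih =>
    intro a
    simp only [List.foldl_cons]
    rw [show min (C - a) (C - f h) = C - max a (f h) by omega, ih]

theorem gv_take (arr : List Int) (m i : Nat) (h : i < m) : gv (arr.take m) i = gv arr i := by
  unfold gv
  rw [List.getD_eq_getElem?_getD, List.getD_eq_getElem?_getD, List.getElem?_take]
  simp [h]

theorem map_gv_range (l : List Int) : (List.range l.length).map (fun j => gv l j) = l := by
  induction l with
  | nil => rfl
  | cons a t ih =>
    rw [List.length_cons, List.range_succ_eq_map, List.map_cons, List.map_map]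
    rw [show ((fun j => gv (a :: t) j) ∘ Nat.succ) = (fun j => gv t j) from funext fun j => rfl]
    rw [ih]
    rfl

theorem filter_range_eraseIdx (l : List Int) : ∀ (k : Nat),
    ((List.range l.length).filter (fun j => j ≠ k)).map (fun j => gv l j) = l.eraseIdx k := by
  induction l with
  | nil => intro k; rfl
  | cons a t ih =>
    intro k
    rw [List.length_cons, List.range_succ_eq_map, List.filter_cons]
    cases k with
    | zero =>
      rw [if_neg (by simp)]
      rw [List.filter_map,
          show ((fun (j : Nat) => decide (j ≠ 0)) ∘ Nat.succ) = (fun _ => true) from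
            funext fun j => by simp,
          List.filter_true, List.map_map,
          show ((fun j => gv (a :: t) j) ∘ Nat.succ) = (fun j => gv t j) from funext fun j => rfl,
          map_gv_range]
      rfl
    | succ k' =>
      rw [if_pos (by simp)]
      rw [List.filter_map,
          show ((fun (j : Nat) => decide (j ≠ (k' + 1))) ∘ Nat.succ) = (fun j => decide (j ≠ k'))
            from funext fun j => by simp,
          List.map_cons, List.map_map,
          show ((fun j => gv (a :: t) j) ∘ Nat.succ) = (fun j => gv t j) from funext fun j => rfl,
          ih k']
      rfl

-- the common normal form both ports are reduced to
def normForm (l : List Int) (m : Nat) : Int :=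
  cost l - (List.range (m - 1)).foldl (fun x k => max x (save l (k + 1))) (save l 0)

theorem solve_eval (n : Int) (arr : List Int) (m : Nat)
    (hn : n = (m : Int)) (hm : 2 ≤ m) (hml : m ≤ arr.length) :
    solve n arr = normForm (arr.take m) m := by
  subst hn
  have hne : (m : Int) ≠ 1 := by omega
  set l := arr.take m with hl
  have hll : l.length = m := by simp [hl]; omega
  have hgv : ∀ i : Nat, i < m → gv arr i = gv l i := fun i hi => (gv_take arr m i hi).symm
  unfold solve
  rw [if_neg hne]
  dsimp only
  have hm1 : (m : Int) - 1 = ((m - 1 : Nat) : Int) := by omega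
  have hm2 : (m : Int) - 2 = ((m - 2 : Nat) : Int) := by omega
  have htot : ((PySem.List.pyRange 0 ((m : Int) - 1) 1).map
      (fun i => |PySem.List.pyGetD arr i 0 - PySem.List.pyGetD arr (i + 1) 0|)).sum = cost l := by
    rw [hm1, PySem.List.pyRange_zero_natCast, List.map_map, ← cost_indexed l, hll]
    apply congrArg
    apply List.map_congr_left
    intro k hk
    simp only [List.mem_range] at hk
    simp only [Function.comp]
    rw [show ((k : Int) + 1) = ((k + 1 : Nat) : Int) by push_cast; ring]
    simp only [PySem.List.pyGetD_natCast]
    rw [show arr.getD k 0 = gv arr k from rfl, show arr.getD (k + 1) 0 = gv arr (k + 1) from rfl,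
        hgv k (by omega), hgv (k + 1) (by omega)]
  rw [htot]
  have he0 : |PySem.List.pyGetD arr 0 0 - PySem.List.pyGetD arr 1 0| = save l 0 := by
    have g0 : PySem.List.pyGetD arr 0 0 = arr.getD 0 0 := by simp [pysem]
    have g1 : PySem.List.pyGetD arr 1 0 = arr.getD 1 0 := by simp [pysem]
    rw [g0, g1, save, if_pos rfl,
        show arr.getD 0 0 = gv arr 0 from rfl, show arr.getD 1 0 = gv arr 1 from rfl,
        hgv 0 (by omega), hgv 1 (by omega)]
  have heL : |PySem.List.pyGetD arr ((m : Int) - 1) 0 - PySem.List.pyGetD arr ((m : Int) - 2) 0|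
      = save l (m - 1) := by
    rw [hm1, hm2]
    simp only [PySem.List.pyGetD_natCast]
    rw [save, if_neg (by omega), if_pos (by rw [hll]),
        show m - 1 - 1 = m - 2 from rfl,
        show arr.getD (m - 1) 0 = gv arr (m - 1) from rfl,
        show arr.getD (m - 2) 0 = gv arr (m - 2) from rfl,
        hgv (m - 1) (by omega), hgv (m - 2) (by omega)]
  rw [he0, heL]
  rw [PySem.List.pyRange_one, show ((m : Int) - 1 - 1).toNat = m - 2 by omega, List.foldl_map]
  unfold normForm
  congr 1
  refine Eq.trans (PySem.List.foldl_congr_mem _ _ (fun (x : Int) (k : Nat) => max x (save l (k + 1))) _ ?_) ?_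
  · intro acc k hk
    simp only [List.mem_range] at hk
    dsimp only
    have e1 : (1 : Int) + (k : Int) = ((k + 1 : Nat) : Int) := by push_cast; ring
    rw [e1]
    rw [show ((k + 1 : Nat) : Int) - 1 = ((k : Nat) : Int) by push_cast; ring,
        show ((k + 1 : Nat) : Int) + 1 = ((k + 2 : Nat) : Int) by push_cast; ring]
    simp only [PySem.List.pyGetD_natCast]
    rw [save, if_neg (by omega), if_neg (by rw [hll]; omega),
        show k + 1 - 1 = k from rfl, show k + 1 + 1 = k + 2 from rfl,
        show arr.getD (k + 1) 0 = gv arr (k + 1) from rfl,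
        show arr.getD k 0 = gv arr k from rfl,
        show arr.getD (k + 2) 0 = gv arr (k + 2) from rfl,
        hgv (k + 1) (by omega), hgv k (by omega), hgv (k + 2) (by omega)]
  · rw [foldl_max_init (fun k => save l (k + 1)), max_eq_right (save_nonneg l 0),
        show List.range (m - 1) = List.range (m - 2) ++ [m - 2] by
          rw [show m - 1 = (m - 2) + 1 by omega, List.range_succ],
        List.foldl_append]
    simp only [List.foldl_cons, List.foldl_nil]
    rw [show m - 2 + 1 = m - 1 by omega]

theorem bCost_eq_cost (r : List Int) : bCost r = cost r := by
  unfold bCost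
  by_cases hr : r = []
  · subst hr
    rw [PySem.List.len_eq, PySem.List.pyRange_one_eq_nil (by simp)]
    rfl
  have hlen : 0 < r.length := List.length_pos_iff.mpr hr
  have h1 : PySem.List.len r - 1 = ((r.length - 1 : Nat) : Int) := by
    rw [PySem.List.len_eq]; omega
  rw [h1, PySem.List.pyRange_zero_natCast, List.foldl_map]
  rw [← cost_indexed r]
  refine Eq.trans (PySem.List.foldl_congr_mem _ _
      (fun (c : Int) (k : Nat) => c + |gv r k - gv r (k + 1)|) _ ?_) ?_
  · intro acc k _
    dsimp only
    rw [show ((k : Int) + 1) = ((k + 1 : Nat) : Int) by push_cast; ring]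
    simp only [PySem.List.pyGetD_natCast]
    rfl
  · rw [PySem.List.foldl_add, zero_add]

theorem solve_alt_eval (n : Int) (arr : List Int) (m : Nat)
    (hn : n = (m : Int)) (hm : 2 ≤ m) (hml : m ≤ arr.length) :
    solve_alt n arr = normForm (arr.take m) m := by
  subst hn
  have hne : (m : Int) ≠ 1 := by omega
  set l := arr.take m with hl
  have hll : l.length = m := by simp [hl]; omega
  unfold solve_alt
  rw [if_neg hne]
  dsimp only
  rw [PySem.List.foldl_append_singleton_eq_map, List.nil_append,
      PySem.List.pyRange_zero_natCast, List.map_map]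
  have hgv : ∀ i : Nat, i < m → gv arr i = gv l i := fun i hi => (gv_take arr m i hi).symm
  have hmap : (List.range m).map ((fun i => bCost ((((List.range m).map (fun (k : Nat) => (k : Int))).filter
        (fun j => j ≠ i)).map (fun j => PySem.List.pyGetD arr j 0))) ∘ (fun (k : Nat) => (k : Int)))
      = (List.range m).map (fun k => cost l - save l k) := by
    apply List.map_congr_left
    intro k hk
    simp only [List.mem_range] at hk
    simp only [Function.comp]
    rw [List.filter_map,
        show ((fun (j : Int) => decide (j ≠ (k : Int))) ∘ (fun (j : Nat) => (j : Int)))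
          = (fun (j : Nat) => decide (j ≠ k)) from funext fun j => by simp,
        List.map_map,
        show ((fun j => PySem.List.pyGetD arr j 0) ∘ (fun (j : Nat) => (j : Int)))
          = (fun (j : Nat) => gv arr j) from funext fun j => by
            simp only [Function.comp, PySem.List.pyGetD_natCast]; rfl]
    have hmem : ((List.range m).filter (fun j => j ≠ k)).map (fun j => gv arr j)
        = ((List.range m).filter (fun j => j ≠ k)).map (fun j => gv l j) := by
      apply List.map_congr_left
      intro j hj
      have : j ∈ List.range m := List.mem_of_mem_filter hj
      exact hgv j (List.mem_range.mp this)
    rw [hmem, show List.range m = List.range l.length from by rw [hll],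
        filter_range_eraseIdx l k, bCost_eq_cost, cost_eraseIdx l k (by omega) (by omega)]
  rw [hmap]
  have hr : List.range m = 0 :: (List.range (m - 1)).map Nat.succ := by
    have hmm : m = (m - 1) + 1 := by omega
    rw [hmm, List.range_succ_eq_map]
    simp only [Nat.add_sub_cancel]
  rw [hr, List.map_cons, List.map_map, PySem.List.min?_id_cons]
  simp only [Option.getD_some]
  rw [List.foldl_map]
  show (List.range (m - 1)).foldl (fun x k => min x (cost l - save l (k + 1)))
      (cost l - save l 0) = cost l -
      (List.range (m - 1)).foldl (fun x k => max x (save l (k + 1))) (save l 0)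
  exact foldl_min_sub _ _ _ _

theorem solve_spec : Claim_equal_solve := by
  intro n arr _ hpre
  unfold Spec_solve
  rcases hpre with h1 | ⟨h2, h3⟩
  · subst h1; simp [solve, solve_alt]
  · rw [solve_eval n arr n.toNat (by omega) (by omega) (by omega),
        solve_alt_eval n arr n.toNat (by omega) (by omega) (by omega)]
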